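-- pv_equiv track=rewrite | github.com/festeraeb/Garmin-Rsd-Sidescan | rsd_core_crc_plus.py | _read_varuint_from
-- ===== SOURCE A (Python) =====
-- from typing import Optional, Tuple, Dict, List
--
-- def _read_varuint_from(mv, pos, limit) -> Tuple[int,int]:
--     res=0; shift=0
--     while pos<limit:
--         b=mv[pos]; pos+=1; res |= (b & 0x7F) << shift
--         if not (b & 0x80): return res, pos
--         shift += 7
--         if shift > 35: break
--     raise ValueError("VarUInt overflow")
-- ===== SOURCE B (Python) =====
-- def _read_varuint_from(mv, pos, limit):
--     # Two-phase: gather the 7-bit groups, then combine them back-to-front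
--     # as base-128 digits.
--     groups = []
--     while True:
--         if pos >= limit or len(groups) > 5:
--             raise ValueError("VarUInt overflow")
--         b = mv[pos]
--         pos += 1
--         groups.append(b & 0x7F)
--         if not (b & 0x80):
--             break
--     res = 0
--     for g in reversed(groups):
--         res = res * 128 + g
--     return res, pos
-- ===== Notes on version B (the rewrite author's own statement) =====
-- stated objective: alternative
-- what changed: Replaces the interleaved shift/OR-accumulate loop with a two-phase collect-then-reduce: a gather pass collects the 7-bit groups (bounding their count at 6), then a back-to-front fold combines them as base-128 digits by multiply-add instead of bit operations.
import Mathlib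
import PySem

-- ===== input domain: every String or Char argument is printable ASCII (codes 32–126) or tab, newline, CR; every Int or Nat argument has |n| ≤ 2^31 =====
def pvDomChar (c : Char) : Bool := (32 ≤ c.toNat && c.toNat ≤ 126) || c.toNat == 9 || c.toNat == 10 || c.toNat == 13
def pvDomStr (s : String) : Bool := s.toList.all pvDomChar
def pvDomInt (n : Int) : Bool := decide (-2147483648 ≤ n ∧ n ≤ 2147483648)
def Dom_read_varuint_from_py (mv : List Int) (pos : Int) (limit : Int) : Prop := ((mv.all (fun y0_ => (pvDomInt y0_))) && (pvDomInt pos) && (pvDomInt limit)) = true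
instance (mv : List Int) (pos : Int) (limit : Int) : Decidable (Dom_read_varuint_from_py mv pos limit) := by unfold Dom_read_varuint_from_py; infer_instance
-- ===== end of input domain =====

-- B replaces A's interleaved shift/OR-accumulate loop by a collect-then-reduce pair
-- (gather the 7-bit groups, then fold them back-to-front as base-128 digits); alternative decomposition, not faster.

-- ===== PORT A =====
-- literal port of A's while-loop; the raise paths (pos≥limit, IndexError, shift>35) return (0,0), excluded by Pre_
def pvReadLoopA (mv : List Int) (limit : Int) (pos : Int) (res : Int) (shift : Nat) : Int × Int :=
  if pos < limit then
    match PySem.List.pyGet? mv pos with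
    | none => (0, 0)  -- IndexError (outside Pre_)
    | some b =>
      let res' := PySem.Int.bor res ((PySem.Int.band b 127) <<< shift)
      if PySem.Int.band b 128 = 0 then (res', pos + 1)
      else
        let shift' := shift + 7
        if shift' > 35 then (0, 0)  -- break → ValueError (outside Pre_)
        else pvReadLoopA mv limit (pos + 1) res' shift'
  else (0, 0)  -- ValueError "VarUInt overflow" (outside Pre_)
termination_by (limit - pos).toNat
decreasing_by omega

def read_varuint_from_py (mv : List Int) (pos : Int) (limit : Int) : Int × Int :=
  pvReadLoopA mv limit pos 0 0

-- ===== PORT B =====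
-- gather pass of Source B: collect the low-7-bit groups; none = the raise paths
def pvGatherB (mv : List Int) (limit : Int) (pos : Int) (groups : List Int) : Option (List Int × Int) :=
  if pos ≥ limit ∨ groups.length > 5 then none  -- ValueError (outside Pre_)
  else
    match PySem.List.pyGet? mv pos with
    | none => none  -- IndexError (outside Pre_)
    | some b =>
      let groups' := groups ++ [PySem.Int.band b 127]
      if PySem.Int.band b 128 = 0 then some (groups', pos + 1)
      else pvGatherB mv limit (pos + 1) groups'
termination_by 6 - groups.length
decreasing_by simp_all; omega

-- combine pass of Source B: fold the groups back-to-front as base-128 digits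
def pvDigitsVal (gs : List Int) : Int :=
  gs.reverse.foldl (fun r g => r * 128 + g) 0

def read_varuint_from_py_alt (mv : List Int) (pos : Int) (limit : Int) : Int × Int :=
  match pvGatherB mv limit pos [] with
  | none => (0, 0)
  | some (gs, p) => (pvDigitsVal gs, p)

-- ===== PRECONDITION & SPEC =====
-- Pre_: exactly the inputs on which A returns normally — a terminating byte (0x80 bit clear)
-- appears within the first 6 positions, before limit, with all accessed indices valid.
def Pre_read_varuint_from_py (mv : List Int) (pos : Int) (limit : Int) : Prop :=
  ∃ k : Nat, k < 6 ∧ pos + k < limit ∧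
    (∀ i : Nat, i ≤ k → (PySem.List.pyGet? mv (pos + i)).isSome = true) ∧
    (∀ i : Nat, i < k → PySem.Int.band ((PySem.List.pyGet? mv (pos + i)).getD 0) 128 ≠ 0) ∧
    PySem.Int.band ((PySem.List.pyGet? mv (pos + k)).getD 0) 128 = 0

instance (mv : List Int) (pos : Int) (limit : Int) : Decidable (Pre_read_varuint_from_py mv pos limit) := by
  unfold Pre_read_varuint_from_py; infer_instance

def pvWitness_read_varuint_from_py : List Int × Int × Int := ([0], 0, 1)

def Spec_read_varuint_from_py (mv : List Int) (pos : Int) (limit : Int) (out : Int × Int) : Prop := out = read_varuint_from_py_alt mv pos limit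
instance (mv : List Int) (pos : Int) (limit : Int) (out : Int × Int) : Decidable (Spec_read_varuint_from_py mv pos limit out) := by unfold Spec_read_varuint_from_py; infer_instance

-- ===== CLAIM (what is proved, stated in full; the proofs are below) =====
def Claim_equal_read_varuint_from_py : Prop := ∀ (mv : List Int) (pos : Int) (limit : Int), Dom_read_varuint_from_py mv pos limit → Pre_read_varuint_from_py mv pos limit → Spec_read_varuint_from_py mv pos limit (read_varuint_from_py mv pos limit)

-- ===== LEMMAS AND PROOFS =====

-- b & 0x7F always lies in [0,128)
theorem pv_band127_bounds (b : Int) : 0 ≤ PySem.Int.band b 127 ∧ PySem.Int.band b 127 ≤ 127 := by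
  unfold PySem.Int.band
  split_ifs with h1 h2 h2
  · have hx : b.toNat &&& (127 : Int).toNat ≤ (127 : Int).toNat := Nat.and_le_right
    omega
  · omega
  · omega
  · omega

theorem pv_band127_le (b : Int) : PySem.Int.band b 127 ≤ 127 := (pv_band127_bounds b).2
theorem pv_band127_nonneg (b : Int) : 0 ≤ PySem.Int.band b 127 := (pv_band127_bounds b).1

-- disjoint-field OR is addition, on ℕ
theorem pv_nat_or_add (a b n : Nat) (h : a < 2 ^ n) : a ||| (b * 2 ^ n) = a + b * 2 ^ n := by
  apply Nat.eq_of_testBit_eq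
  intro j
  have hadd : a + b * 2 ^ n = 2 ^ n * b + a := by ring
  rw [Nat.testBit_or, hadd, Nat.testBit_two_pow_mul_add b h j, ← Nat.shiftLeft_eq,
      Nat.testBit_shiftLeft]
  by_cases hj : j < n
  · simp [hj, Nat.not_le.mpr hj]
  · have ha : a.testBit j = false :=
      Nat.testBit_eq_false_of_lt (lt_of_lt_of_le h (Nat.pow_le_pow_right (by norm_num) (Nat.not_lt.mp hj)))
    simp [ha, Nat.not_lt.mp hj]

-- disjoint-field OR is addition, lifted to PySem.Int.bor
theorem pv_bor_add (a x : Int) (n : Nat) (ha0 : 0 ≤ a) (ha : a < 2 ^ n) (hx : 0 ≤ x) :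
    PySem.Int.bor a (x <<< n) = a + x * 2 ^ n := by
  obtain ⟨a', rfl⟩ := Int.eq_ofNat_of_zero_le ha0
  obtain ⟨x', rfl⟩ := Int.eq_ofNat_of_zero_le hx
  have hsh : ((x' : Int) <<< n) = ((x' <<< n : Nat) : Int) := by
    rw [Int.shiftLeft_eq, Nat.shiftLeft_eq]; push_cast; ring
  rw [hsh, PySem.Int.bor_natCast, Nat.shiftLeft_eq, pv_nat_or_add a' x' n (by exact_mod_cast ha)]
  push_cast; ring

-- shifting the initial accumulator out of the base-128 fold
theorem pv_foldl_init (l : List Int) : ∀ a : Int,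
    l.foldl (fun r g => r * 128 + g) a = a * 128 ^ l.length + l.foldl (fun r g => r * 128 + g) 0 := by
  induction l with
  | nil => intro a; simp
  | cons g l ih =>
    intro a
    simp only [List.foldl_cons, List.length_cons]
    rw [ih (a * 128 + g), ih (0 * 128 + g)]
    ring

-- appending a group adds a top base-128 digit
theorem pv_digitsVal_append (gs : List Int) (g : Int) :
    pvDigitsVal (gs ++ [g]) = g * 128 ^ gs.length + pvDigitsVal gs := by
  unfold pvDigitsVal
  rw [List.reverse_append, List.reverse_singleton, List.singleton_append, List.foldl_cons,
      pv_foldl_init]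
  simp

theorem pv_pow_128 (n : Nat) : (2 : Int) ^ (7 * n) = 128 ^ n := by
  rw [pow_mul]; norm_num

-- the accumulator update of A equals appending a digit in B
theorem pv_res_step (res b : Int) (len : Nat) (h0 : 0 ≤ res) (h1 : res < 128 ^ len) (gs : List Int)
    (hval : pvDigitsVal gs = res) (hlen : gs.length = len) :
    PySem.Int.bor res ((PySem.Int.band b 127) <<< (7 * len)) = pvDigitsVal (gs ++ [PySem.Int.band b 127]) := by
  rw [pv_digitsVal_append, hval, hlen,
      pv_bor_add res (PySem.Int.band b 127) (7 * len) h0 (by rw [pv_pow_128]; exact h1)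
        (pv_band127_nonneg b), pv_pow_128]
  ring

-- main bridge: whenever the remaining input carries a terminator within the allowance,
-- the gather pass succeeds and A's loop, started on the state summarising `groups`,
-- produces the same pair
theorem pv_main (k : Nat) : ∀ (mv : List Int) (limit pos : Int) (groups : List Int),
    groups.length + k ≤ 5 →
    pos + k < limit →
    (∀ i : Nat, i ≤ k → (PySem.List.pyGet? mv (pos + i)).isSome = true) →
    (∀ i : Nat, i < k → PySem.Int.band ((PySem.List.pyGet? mv (pos + i)).getD 0) 128 ≠ 0) →
    PySem.Int.band ((PySem.List.pyGet? mv (pos + k)).getD 0) 128 = 0 →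
    0 ≤ pvDigitsVal groups → pvDigitsVal groups < 128 ^ groups.length →
    ∃ gs p, pvGatherB mv limit pos groups = some (gs, p) ∧
      pvReadLoopA mv limit pos (pvDigitsVal groups) (7 * groups.length) = (pvDigitsVal gs, p) := by
  induction k with
  | zero =>
    intro mv limit pos groups hlen hlim hsome _hcont hterm hv0 hv1
    have hpos : pos < limit := by omega
    obtain ⟨b, hb⟩ := Option.isSome_iff_exists.mp (by simpa using hsome 0 (Nat.le_refl 0))
    have hb' : PySem.List.pyGet? mv pos = some b := by simpa using hb
    have hterm' : PySem.Int.band b 128 = 0 := by simpa [hb'] using hterm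
    refine ⟨groups ++ [PySem.Int.band b 127], pos + 1, ?_, ?_⟩
    · rw [pvGatherB, if_neg (show ¬(pos ≥ limit ∨ groups.length > 5) by omega)]
      simp only [hb', if_pos hterm']
    · rw [pvReadLoopA, if_pos hpos]
      simp only [hb', if_pos hterm',
        pv_res_step (pvDigitsVal groups) b groups.length hv0 hv1 groups rfl rfl]
  | succ k ih =>
    intro mv limit pos groups hlen hlim hsome hcont hterm hv0 hv1
    have hpos : pos < limit := by omega
    obtain ⟨b, hb⟩ := Option.isSome_iff_exists.mp (by simpa using hsome 0 (Nat.zero_le _))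
    have hb' : PySem.List.pyGet? mv pos = some b := by simpa using hb
    have hcont0 : PySem.Int.band b 128 ≠ 0 := by
      have := hcont 0 (Nat.succ_pos k); simpa [hb'] using this
    set g := PySem.Int.band b 127 with hg
    have hshift : ∀ i : Int, pos + 1 + i = pos + (i + 1) := by intro i; ring
    have ihres := ih mv limit (pos + 1) (groups ++ [g])
      (by simp; omega)
      (by omega)
      (fun i hi => by rw [hshift]; exact_mod_cast hsome (i + 1) (by omega))
      (fun i hi => by rw [hshift]; exact_mod_cast hcont (i + 1) (by omega))
      (by rw [hshift]; exact_mod_cast hterm)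
      (by rw [pv_digitsVal_append]
          have := pv_band127_nonneg b
          have h128 : (0:Int) < 128 ^ groups.length := by positivity
          nlinarith)
      (by rw [pv_digitsVal_append]
          simp only [List.length_append, List.length_cons, List.length_nil]
          have hle := pv_band127_le b
          have h128 : (0:Int) < 128 ^ groups.length := by positivity
          have : g * 128 ^ groups.length ≤ 127 * 128 ^ groups.length :=
            mul_le_mul_of_nonneg_right hle (le_of_lt h128)
          calc g * 128 ^ groups.length + pvDigitsVal groups
              < 127 * 128 ^ groups.length + 128 ^ groups.length := by omega
            _ = 128 ^ (groups.length + 1) := by ring)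
    obtain ⟨gs, p, hgath, hloop⟩ := ihres
    refine ⟨gs, p, ?_, ?_⟩
    · rw [pvGatherB, if_neg (show ¬(pos ≥ limit ∨ groups.length > 5) by omega)]
      simp only [hb', if_neg hcont0, ← hg]
      exact hgath
    · rw [pvReadLoopA, if_pos hpos]
      simp only [hb', if_neg hcont0,
        if_neg (show ¬(7 * groups.length + 7 > 35) by omega)]
      rw [pv_res_step (pvDigitsVal groups) b groups.length hv0 hv1 groups rfl rfl, ← hg]
      have hlen' : 7 * groups.length + 7 = 7 * (groups ++ [g]).length := by simp; ring
      rw [hlen']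
      exact hloop

-- ===== VERDICT (by name: the statement is the Claim_ definition above) =====
theorem read_varuint_from_py_spec : Claim_equal_read_varuint_from_py := by
  intro mv pos limit _hdom hpre
  obtain ⟨k, hk6, hlim, hsome, hcont, hterm⟩ := hpre
  obtain ⟨gs, p, hgath, hloop⟩ :=
    pv_main k mv limit pos [] (by simp; omega) hlim hsome hcont hterm (by simp [pvDigitsVal]) (by simp [pvDigitsVal])
  unfold Spec_read_varuint_from_py read_varuint_from_py read_varuint_from_py_alt
  rw [hgath]
  simpa using hloop
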